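-- pv_equiv track=rewrite | github.com/SHANAVAZ900/CP-2 | 04-longestdigitrun-Python/longestdigitrun.py | longestdigitrun
-- ===== SOURCE A (Python) =====
-- def longestdigitrun(n):
--     # Your code goes here
--     s1 = str(abs(n))
--     first, last, high, j, calc = 0, 0, 0, 0, 0
--     while last < len(s1):
--         while last < len(s1) and s1[first] == s1[last]:
--             last += 1
--         if last - first > calc:
--             high = s1[first]
--             calc = last - first
--         elif last - first == calc:
--             high = min(high, s1[first])
--         if last == len(s1):
--             break
--         first = last
--     return int(high)
-- ===== SOURCE B (Python) =====
-- def longestdigitrun(n):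
--     # Build an explicit run-length table, then reduce: max run length,
--     # then the smallest digit among runs of that length.
--     s = str(abs(n))
--     runs = []
--     prev, cnt = None, 0
--     for ch in s:
--         if ch == prev:
--             cnt += 1
--         else:
--             if prev is not None:
--                 runs.append((prev, cnt))
--             prev, cnt = ch, 1
--     if prev is not None:
--         runs.append((prev, cnt))
--     best = max(c for _, c in runs)
--     return int(min(d for d, c in runs if c == best))
-- ===== Notes on version B (the rewrite author's own statement) =====
-- stated objective: alternative
-- what changed: Replaces A's interleaved two-pointer index scan (inner while advancing 'last', running best updated in place) with a table-then-reduce structure: one pass builds an explicit list of (digit, run-length) pairs, then two separate reductions take the maximum length and the minimum digit among maximal runs.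
import Mathlib
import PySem

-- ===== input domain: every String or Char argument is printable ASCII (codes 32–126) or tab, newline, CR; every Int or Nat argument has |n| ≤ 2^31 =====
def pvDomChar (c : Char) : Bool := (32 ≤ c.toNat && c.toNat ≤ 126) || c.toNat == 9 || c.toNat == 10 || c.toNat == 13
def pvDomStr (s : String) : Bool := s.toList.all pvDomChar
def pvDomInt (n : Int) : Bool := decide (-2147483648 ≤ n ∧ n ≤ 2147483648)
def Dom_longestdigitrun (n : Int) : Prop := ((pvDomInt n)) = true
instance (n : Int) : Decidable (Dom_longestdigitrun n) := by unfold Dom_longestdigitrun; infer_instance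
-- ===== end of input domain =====

-- B replaces A's interleaved two-pointer scan with a run-length table built in one pass,
-- then two reductions (max length, min digit among maximal runs); alternative structure, same cost.

-- ===== PORT A =====
-- inner 'while last < len(s1) and s1[first] == s1[last]: last += 1'
-- (fuel = a totality guard only: s.length - last more steps are always enough)
def innerA (s : List Char) (first : Nat) : Nat → Nat → Nat
  | last, 0 => last
  | last, fuel + 1 =>
    if last < s.length ∧ (s[first]? == s[last]?) then innerA s first (last + 1) fuel else last

-- outer while loop of A; at the top of each iteration first == last, so the port
-- carries the single index 'first' and recomputes 'last' with the inner loop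
-- (fuel = a totality guard only: the index strictly grows, s.length + 1 steps suffice).
-- A's 'high' starts as the int 0 and is only returned un-assigned when the loop body
-- never runs (impossible: str(abs(n)) is nonempty); '0' is the matching placeholder.
def outerA (s : List Char) : Nat → Char → Nat → Nat → Char
  | _, high, _, 0 => high
  | first, high, calcv, fuel + 1 =>
    if first < s.length then
      let last := innerA s first first (s.length - first)
      let hc : Char × Nat :=
        if last - first > calcv then (s[first]?.getD '0', last - first)
        else if last - first = calcv then (min high (s[first]?.getD '0'), calcv)
        else (high, calcv)
      if last = s.length then hc.1 else outerA s last hc.1 hc.2 fuel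
    else high

def longestdigitrun (n : Int) : Int :=
  let s1 := PySem.Int.toChars |n|
  (PySem.Int.ofChars? [outerA s1 0 '0' 0 (s1.length + 1)]).getD 0   -- return int(high)

-- ===== PORT B =====
-- loop body of 'for ch in s' building the run table (runs, prev, cnt)
def stepB (st : List (Char × Nat) × Option Char × Nat) (ch : Char) :
    List (Char × Nat) × Option Char × Nat :=
  match st with
  | (runs, prev, cnt) =>
    if prev = some ch then (runs, prev, cnt + 1)
    else ((match prev with | none => runs | some p => runs ++ [(p, cnt)]), some ch, 1)

-- the for-loop plus the final 'if prev is not None: runs.append((prev, cnt))'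
def runsOf (s : List Char) : List (Char × Nat) :=
  match s.foldl stepB ([], none, 0) with
  | (runs, none, _) => runs
  | (runs, some p, cnt) => runs ++ [(p, cnt)]

-- port of max(c for _, c in runs)  (runs is never empty; [] ↦ 0 is unreachable)
def pyMaxLen : List (Char × Nat) → Nat
  | [] => 0
  | (_, k) :: rest => max k (pyMaxLen rest)

-- port of min(d for d, c in runs if c == best); none = empty generator (unreachable)
def pyMinChar : List (Char × Nat) → Nat → Option Char
  | [], _ => none
  | (d, k) :: rest, m =>
    if k = m then some (match pyMinChar rest m with | none => d | some x => min d x)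
    else pyMinChar rest m

def longestdigitrun_alt (n : Int) : Int :=
  let s := PySem.Int.toChars |n|
  let rs := runsOf s
  let best := pyMaxLen rs
  (PySem.Int.ofChars? [(pyMinChar rs best).getD '0']).getD 0

-- ===== PRECONDITION & SPEC =====
def Spec_longestdigitrun (n : Int) (out : Int) : Prop := out = longestdigitrun_alt n
instance (n : Int) (out : Int) : Decidable (Spec_longestdigitrun n out) := by unfold Spec_longestdigitrun; infer_instance

-- ===== CLAIM (what is proved, stated in full; the proofs are below) =====
def Claim_equal_longestdigitrun : Prop := ∀ (n : Int), Dom_longestdigitrun n → Spec_longestdigitrun n (longestdigitrun n)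

-- ===== LEMMAS AND PROOFS =====

-- length of the leading run of x's
def lead (x : Char) : List Char → Nat
  | [] => 0
  | c :: t => if c = x then lead x t + 1 else 0

-- canonical run decomposition
def cruns : List Char → List (Char × Nat)
  | [] => []
  | c :: t => (c, lead c t + 1) :: cruns (t.drop (lead c t))
termination_by l => l.length
decreasing_by
  simp only [List.length_cons, List.length_drop]; omega

-- abstract form of A's outer loop: one step per run
def foldA : List (Char × Nat) → Char → Nat → Char
  | [], h, _ => h
  | (d, k) :: rest, h, c =>
    if k > c then foldA rest d k
    else if k = c then foldA rest (min h d) c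
    else foldA rest h c

theorem innerA_eq (s : List Char) (first : Nat) (d : Char) (hd : s[first]? = some d) :
    ∀ (fuel last : Nat), s.length - last ≤ fuel →
      innerA s first last fuel = last + lead d (s.drop last) := by
  intro fuel
  induction fuel with
  | zero =>
    intro last hle
    rw [List.drop_eq_nil_of_le (by omega)]
    simp [innerA, lead]
  | succ fuel ih =>
    intro last hle
    by_cases h : last < s.length ∧ ((s[first]? == s[last]?) = true)
    · rw [innerA, if_pos h, ih (last + 1) (by omega)]
      obtain ⟨hl, hb⟩ := h
      have hfl : s[first]? = s[last]? := eq_of_beq hb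
      have hsl : s[last]? = some d := by rw [← hfl, hd]
      have hget : s[last] = d := by
        have := List.getElem?_eq_getElem hl
        rw [this] at hsl; exact Option.some.inj hsl
      have hdrop : s.drop last = d :: s.drop (last + 1) := by
        rw [← List.getElem_cons_drop hl, hget]
      rw [hdrop]
      simp [lead]
      omega
    · rw [innerA, if_neg h]
      by_cases hl : last < s.length
      · have hsl : s[last]? = some s[last] := List.getElem?_eq_getElem hl
        have hne : s[last] ≠ d := by
          intro he
          exact h ⟨hl, by rw [hd, hsl, he]; simp⟩
        have hdrop : s.drop last = s[last] :: s.drop (last + 1) :=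
          (List.getElem_cons_drop hl).symm
        rw [hdrop]
        simp [lead, hne]
      · rw [List.drop_eq_nil_of_le (by omega)]
        simp [lead]

theorem foldB_inv : ∀ (l : List Char) (acc : List (Char × Nat)) (p : Char) (c : Nat),
    (match l.foldl stepB (acc, some p, c) with
     | (runs, none, _) => runs
     | (runs, some q, k) => runs ++ [(q, k)]) =
    acc ++ (p, c + lead p l) :: cruns (l.drop (lead p l)) := by
  intro l
  induction l with
  | nil => intro acc p c; simp [lead, cruns]
  | cons ch t ih =>
    intro acc p c
    rw [List.foldl_cons]
    by_cases hpc : p = ch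
    · subst hpc
      have : stepB (acc, some p, c) p = (acc, some p, c + 1) := by simp [stepB]
      rw [this, ih]
      have hlead : lead p (p :: t) = lead p t + 1 := by simp [lead]
      rw [hlead, List.drop_succ_cons]
      have : c + (lead p t + 1) = c + 1 + lead p t := by omega
      rw [this]
    · have : stepB (acc, some p, c) ch = (acc ++ [(p, c)], some ch, 1) := by
        simp [stepB, hpc]
      rw [this, ih]
      have hl : lead p (ch :: t) = 0 := by
        simp [lead, show ch ≠ p from fun h => hpc h.symm]
      rw [hl]
      simp only [List.drop_zero, List.append_assoc, List.singleton_append, cruns]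
      have : (1 : Nat) + lead ch t = lead ch t + 1 := by omega
      rw [this]
      simp

theorem runsOf_eq_cruns (s : List Char) : runsOf s = cruns s := by
  cases s with
  | nil => simp [runsOf, cruns]
  | cons c t =>
    unfold runsOf
    rw [List.foldl_cons]
    have : stepB ([], none, 0) c = ([], some c, 1) := by simp [stepB]
    rw [this]
    have := foldB_inv t [] c 1
    simp only [List.nil_append] at this
    rw [this]
    simp only [cruns]
    have h1 : (1 : Nat) + lead c t = lead c t + 1 := by omega
    rw [h1]

theorem outerA_eq_aux (s : List Char) :
    ∀ (fuel first : Nat) (high : Char) (calcv : Nat), s.length - first < fuel →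
      outerA s first high calcv fuel = foldA (cruns (s.drop first)) high calcv := by
  intro fuel
  induction fuel with
  | zero => intro first high calcv hm; omega
  | succ fuel ih =>
    intro first high calcv hm
    by_cases hf : first < s.length
    · have hget : s[first]? = some s[first] := List.getElem?_eq_getElem hf
      have hinner := innerA_eq s first s[first] hget (s.length - first) first (by omega)
      have hdrop : s.drop first = s[first] :: s.drop (first + 1) :=
        (List.getElem_cons_drop hf).symm
      have hleadc : lead s[first] (s.drop first) = lead s[first] (s.drop (first + 1)) + 1 := by
        rw [hdrop]; simp [lead]
      set L := lead s[first] (s.drop (first + 1)) with hL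
      have hinner' : innerA s first first (s.length - first) = first + (L + 1) := by
        rw [hinner, hleadc]
      have hdd : (s.drop (first + 1)).drop L = s.drop (first + 1 + L) := by
        rw [List.drop_drop]
      have hcr : cruns (s.drop first) = (s[first], L + 1) :: cruns (s.drop (first + 1 + L)) := by
        rw [hdrop]
        simp only [cruns, ← hL, hdd]
      clear_value L
      rw [outerA, if_pos hf]
      simp only [hinner', hget, Option.getD_some]
      have hrun : first + (L + 1) - first = L + 1 := by omega
      rw [hrun, hcr]
      set hc : Char × Nat :=
        if L + 1 > calcv then (s[first], L + 1)
        else if L + 1 = calcv then (min high s[first], calcv)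
        else (high, calcv) with hhc
      have hfold : foldA ((s[first], L + 1) :: cruns (s.drop (first + 1 + L))) high calcv =
          foldA (cruns (s.drop (first + 1 + L))) hc.1 hc.2 := by
        simp only [foldA, hhc]
        split_ifs <;> rfl
      rw [hfold]
      by_cases hend : first + (L + 1) = s.length
      · rw [if_pos hend]
        have : s.drop (first + 1 + L) = [] := by
          apply List.drop_eq_nil_of_le; omega
        rw [this]
        simp [cruns, foldA]
      · rw [if_neg hend]
        have hlt : s.length - (first + (L + 1)) < fuel := by omega
        have hih := ih (first + (L + 1)) hc.1 hc.2 hlt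
        rw [show first + 1 + L = first + (L + 1) from by omega]
        exact hih
    · rw [outerA, if_neg hf]
      rw [List.drop_eq_nil_of_le (by omega)]
      simp [cruns, foldA]

theorem cruns_len_pos : ∀ (l : List Char), ∀ p ∈ cruns l, 0 < p.2 := by
  intro l
  induction l using cruns.induct with
  | case1 => simp [cruns]
  | case2 c t ih =>
    intro p hp
    rw [cruns] at hp
    rcases List.mem_cons.mp hp with h | h
    · subst h; simp
    · exact ih p h

theorem foldA_le : ∀ (rs : List (Char × Nat)) (h : Char) (c : Nat), pyMaxLen rs ≤ c →
    foldA rs h c = min h ((pyMinChar rs c).getD h) := by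
  intro rs
  induction rs with
  | nil => intro h c _; simp [foldA, pyMinChar]
  | cons p rest ih =>
    intro h c hm
    obtain ⟨d, k⟩ := p
    simp only [pyMaxLen, Nat.max_le] at hm
    obtain ⟨hk, hB⟩ := hm
    simp only [foldA, pyMinChar]
    rw [if_neg (by omega)]
    by_cases h2 : k = c
    · rw [if_pos h2, if_pos h2, ih (min h d) c hB]
      cases hx : pyMinChar rest c with
      | none => simp
      | some x => simp [min_assoc]
    · rw [if_neg h2, if_neg h2, ih h c hB]

theorem foldA_gt : ∀ (rs : List (Char × Nat)) (h : Char) (c : Nat), c < pyMaxLen rs →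
    ∃ x, pyMinChar rs (pyMaxLen rs) = some x ∧ foldA rs h c = x := by
  intro rs
  induction rs with
  | nil => intro h c hc; simp [pyMaxLen] at hc
  | cons p rest ih =>
    intro h c hc
    obtain ⟨d, k⟩ := p
    simp only [pyMaxLen] at hc ⊢
    simp only [pyMinChar, foldA]
    by_cases h1 : k > c
    · rw [if_pos h1]
      by_cases h2 : k < pyMaxLen rest
      · obtain ⟨x, hx, he⟩ := ih d k h2
        rw [Nat.max_eq_right (Nat.le_of_lt h2), if_neg (by omega), hx, he]
        exact ⟨x, rfl, rfl⟩
      · rw [Nat.max_eq_left (by omega), if_pos rfl,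
            foldA_le rest d k (by omega)]
        cases hx : pyMinChar rest k with
        | none => exact ⟨d, rfl, by simp⟩
        | some x => exact ⟨min d x, rfl, by simp⟩
    · have hB : c < pyMaxLen rest := by
        rcases max_choice k (pyMaxLen rest) with hmx | hmx <;> omega
      rw [Nat.max_eq_right (by omega), if_neg (by omega), if_neg h1]
      by_cases h2 : k = c
      · rw [if_pos h2]; exact ih (min h d) c hB
      · rw [if_neg h2]; exact ih h c hB

theorem runs_char_eq (l : List Char) :
    outerA l 0 '0' 0 (l.length + 1) = (pyMinChar (runsOf l) (pyMaxLen (runsOf l))).getD '0' := by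
  have h0 := outerA_eq_aux l (l.length + 1) 0 '0' 0 (by omega)
  rw [List.drop_zero] at h0
  rw [h0, runsOf_eq_cruns]
  by_cases hb : 0 < pyMaxLen (cruns l)
  · obtain ⟨x, hx, he⟩ := foldA_gt (cruns l) '0' 0 hb
    rw [he, hx, Option.getD_some]
  · cases hrs : cruns l with
    | nil => simp [foldA, pyMinChar]
    | cons p t =>
      exfalso
      obtain ⟨d, k⟩ := p
      have hp : 0 < k := cruns_len_pos l (d, k) (by rw [hrs]; exact List.mem_cons_self)
      rw [hrs] at hb
      simp only [pyMaxLen] at hb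
      rcases max_choice k (pyMaxLen t) with hmx | hmx <;> omega

-- ===== VERDICT (by name: the statement is the Claim_ definition above) =====
theorem longestdigitrun_spec : Claim_equal_longestdigitrun := by
  intro n _
  simp only [Spec_longestdigitrun, longestdigitrun, longestdigitrun_alt, runs_char_eq]
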